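-- pv_equiv track=rewrite | github.com/aaeagal/runtime_investigation | script/getClusters.py | cluster_runtime_behavior
-- ===== SOURCE A (Python) =====
-- def cluster_runtime_behavior(data):
--     clusters = {}
--     for method_name, method_data in data.items():
--         # Convert the tuple key to a string representation
--         cluster_key = f"{method_data['input_types']}-{method_data['output_values']}"
--         if cluster_key not in clusters:
--             clusters[cluster_key] = []
--         clusters[cluster_key].append(method_name)
--     return clusters
-- ===== SOURCE B (Python) =====
-- def cluster_runtime_behavior(data):
--     pairs = [(md["input_types"] + "-" + md["output_values"], name)
--              for name, md in data.items()]
--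
--     def group(ps):
--         if not ps:
--             return {}
--         k = ps[0][0]
--         out = {k: [n for kk, n in ps if kk == k]}
--         out.update(group([p for p in ps if p[0] != k]))
--         return out
--
--     return group(pairs)
-- ===== Notes on version B (the rewrite author's own statement) =====
-- stated objective: alternative
-- what changed: Replaces A's single-pass hash-dict accumulation with a recursive partition grouping: build the (cluster_key, name) pairs once, then repeatedly take the first remaining key, collect all its names in one scan, and recurse on the pairs with a different key.
import Mathlib
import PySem

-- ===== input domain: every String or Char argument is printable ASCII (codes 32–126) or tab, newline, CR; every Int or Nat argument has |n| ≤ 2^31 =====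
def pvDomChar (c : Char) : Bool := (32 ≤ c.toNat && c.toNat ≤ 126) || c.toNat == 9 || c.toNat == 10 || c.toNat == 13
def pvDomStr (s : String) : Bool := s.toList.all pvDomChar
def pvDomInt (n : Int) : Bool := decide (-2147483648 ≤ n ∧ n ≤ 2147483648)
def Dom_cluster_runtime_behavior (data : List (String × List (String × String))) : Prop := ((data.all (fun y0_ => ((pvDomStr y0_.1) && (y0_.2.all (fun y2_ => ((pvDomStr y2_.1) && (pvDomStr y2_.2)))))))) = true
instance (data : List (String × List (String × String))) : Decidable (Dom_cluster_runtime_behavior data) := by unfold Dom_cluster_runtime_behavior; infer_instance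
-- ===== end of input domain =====

-- B replaces A's single-pass hash-dict accumulation by recursive partition grouping (take the first
-- remaining key, collect its names in one scan, recurse on the rest); objective: alternative, not faster.


-- ===== PORT A =====
-- cluster_key = f"{md['input_types']}-{md['output_values']}"; none = KeyError (excluded by Pre_)
def clusterKeyA (md : List (String × String)) : Option String :=
  match (PySem.Dict.ofList md).get? "input_types", (PySem.Dict.ofList md).get? "output_values" with
  | some a, some b => some (a ++ "-" ++ b)
  | _, _ => none

-- the for-loop over data.items(); on a KeyError (none) Python raises — excluded by Pre_, the fold stops there
def goA : List (String × List (String × String)) → PySem.Dict String (List String) → PySem.Dict String (List String)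
  | [], clusters => clusters
  | (name, md) :: rest, clusters =>
      match clusterKeyA md with
      | some key =>
          let clusters1 := if clusters.contains key then clusters else clusters.insert key []
          goA rest (clusters1.modify key [] (· ++ [name]))
      | none => clusters

def cluster_runtime_behavior (data : List (String × List (String × String))) : List (String × List String) :=
  (goA (PySem.Dict.ofList data).items PySem.Dict.empty).items

-- ===== PORT B =====
-- the pairs list comprehension with the f-string inline; a missing key (Python: KeyError)
-- is excluded by Pre_, skipped here
def pairsB : List (String × List (String × String)) → List (String × String)
  | [] => []
  | (name, md) :: rest =>
      match (PySem.Dict.ofList md).get? "input_types", (PySem.Dict.ofList md).get? "output_values" with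
      | some a, some b => (a ++ "-" ++ b, name) :: pairsB rest
      | _, _ => pairsB rest

-- B's recursive 'group': first entry of the {k: same} dict, then out.update(group(rest)).
-- group(rest)'s keys all differ from k (they come from pairs filtered by != k), so the dict
-- update appends its items after (k, same): exact as the cons of the two items lists.
def groupB : List (String × String) → List (String × List String)
  | [] => []
  | p :: rest =>
      (p.1, ((p :: rest).filter (fun q => q.1 == p.1)).map (·.2)) ::
      groupB ((p :: rest).filter (fun q => q.1 != p.1))
termination_by l => l.length
decreasing_by
  simp only [List.filter_cons, bne_self_eq_false, Bool.false_eq_true, if_false, List.length_cons]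
  exact Nat.lt_succ_of_le (List.length_filter_le _ _)

def cluster_runtime_behavior_alt (data : List (String × List (String × String))) : List (String × List String) :=
  groupB (pairsB (PySem.Dict.ofList data).items)

-- ===== PRECONDITION & SPEC =====
-- Pre_ excludes exactly the inputs where A raises KeyError: some method_data dict lacking
-- 'input_types' or 'output_values'.
def Pre_cluster_runtime_behavior (data : List (String × List (String × String))) : Prop :=
  (data.all (fun p => (PySem.Dict.ofList p.2).contains "input_types"
                   && (PySem.Dict.ofList p.2).contains "output_values")) = true
instance (data : List (String × List (String × String))) : Decidable (Pre_cluster_runtime_behavior data) := by unfold Pre_cluster_runtime_behavior; infer_instance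

def pvWitness_cluster_runtime_behavior : (List (String × List (String × String))) :=
  [("f", [("input_types", "int"), ("output_values", "bool")]),
   ("g", [("input_types", "int"), ("output_values", "bool")])]

def Spec_cluster_runtime_behavior (data : List (String × List (String × String))) (out : List (String × List String)) : Prop := out = cluster_runtime_behavior_alt data
instance (data : List (String × List (String × String))) (out : List (String × List String)) : Decidable (Spec_cluster_runtime_behavior data out) := by unfold Spec_cluster_runtime_behavior; infer_instance

-- ===== CLAIM (what is proved, stated in full; the proofs are below) =====
def Claim_equal_cluster_runtime_behavior : Prop := ∀ (data : List (String × List (String × String))), Dom_cluster_runtime_behavior data → Pre_cluster_runtime_behavior data → Spec_cluster_runtime_behavior data (cluster_runtime_behavior data)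

-- ===== LEMMAS AND PROOFS =====

-- every item of dict(data) is a pair of data
theorem mem_items_update_sub {κ ν : Type} [BEq κ] [LawfulBEq κ] (l : List (κ × ν)) :
    ∀ (d : PySem.Dict κ ν) p, p ∈ (d.update l).items → p ∈ d.items ∨ p ∈ l := by
  induction l with
  | nil => intro d p hp; exact Or.inl hp
  | cons x rest ih =>
    intro d p hp
    have : p ∈ ((d.insert x.1 x.2).update rest).items := hp
    rcases ih _ p this with h | h
    · rcases (PySem.Dict.mem_items_insert d x.1 x.2 p).mp h with h | h
      · exact Or.inr (by simp [h])
      · exact Or.inl h.1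
    · exact Or.inr (List.mem_cons_of_mem _ h)

theorem mem_items_ofList {κ ν : Type} [BEq κ] [LawfulBEq κ] (l : List (κ × ν)) :
    ∀ p ∈ (PySem.Dict.ofList l).items, p ∈ l := by
  intro p hp
  rcases mem_items_update_sub l PySem.Dict.empty p hp with h | h
  · simp [PySem.Dict.empty] at h
  · exact h

-- A's 'if key not in: [] ; append' step is a single modify
theorem stepA_eq_modify (d : PySem.Dict String (List String)) (k : String) (n : String) :
    (if d.contains k then d else d.insert k []).modify k [] (· ++ [n])
      = d.modify k [] (· ++ [n]) := by
  by_cases h : d.contains k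
  · simp [h]
  · simp only [Bool.not_eq_true] at h
    simp only [h, Bool.false_eq_true, if_false, PySem.Dict.modify,
      PySem.Dict.getD_insert_self, PySem.Dict.insert_insert_self,
      PySem.Dict.getD_of_not_contains d [] h]

-- under Pre_, A's loop is a fold of modify over the (key, name) pairs
theorem goA_eq_foldl (L : List (String × List (String × String)))
    (h : ∀ p ∈ L, (clusterKeyA p.2).isSome)
    (d : PySem.Dict String (List String)) :
    goA L d = (L.map (fun p => (((clusterKeyA p.2).getD ""), p.1))).foldl
        (fun d q => d.modify q.1 [] (· ++ [q.2])) d := by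
  induction L generalizing d with
  | nil => rfl
  | cons x rest ih =>
    obtain ⟨name, md⟩ := x
    obtain ⟨key, hk⟩ := Option.isSome_iff_exists.mp (h _ List.mem_cons_self)
    simp only [goA, hk, List.map_cons, List.foldl_cons, Option.getD_some]
    rw [stepA_eq_modify]
    exact ih (fun p hp => h p (List.mem_cons_of_mem _ hp)) _

-- under Pre_, B's pairs list is the same map of keys as A's
theorem pairsB_eq_map (L : List (String × List (String × String)))
    (h : ∀ p ∈ L, (clusterKeyA p.2).isSome) :
    pairsB L = L.map (fun p => (((clusterKeyA p.2).getD ""), p.1)) := by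
  induction L with
  | nil => rfl
  | cons x rest ih =>
    obtain ⟨name, md⟩ := x
    have hx := h _ List.mem_cons_self
    cases ha : (PySem.Dict.ofList md).get? "input_types" with
    | none => simp [clusterKeyA, ha] at hx
    | some a =>
      cases hb : (PySem.Dict.ofList md).get? "output_values" with
      | none => simp [clusterKeyA, ha, hb] at hx
      | some b =>
        simp only [pairsB, ha, hb, clusterKeyA, List.map_cons, Option.getD_some]
        exact congrArg _ (ih (fun p hp => h p (List.mem_cons_of_mem _ hp)))

-- set(xs) with duplicates of the head removed from the tail
theorem foldl_add_mem {α : Type} [BEq α] [LawfulBEq α] (a : α) :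
    ∀ (l : List α) (s : PySem.Set α), a ∈ s →
      List.foldl PySem.Set.add s l = List.foldl PySem.Set.add s (l.filter (fun x => x != a)) := by
  intro l
  induction l with
  | nil => intro s _; rfl
  | cons x rest ih =>
    intro s hs
    by_cases hx : x = a
    · subst hx
      have hadd : PySem.Set.add s x = s := by simp [PySem.Set.add, hs]
      simp only [List.filter_cons, bne_self_eq_false, Bool.false_eq_true, if_false,
        List.foldl_cons, hadd]
      exact ih s hs
    · have hne : (x != a) = true := by simp [bne, hx]
      simp only [List.filter_cons, hne, if_true, List.foldl_cons]
      exact ih _ ((PySem.Set.mem_add s x a).mpr (Or.inl hs))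

-- adding elements ≠ a to a set headed by a keeps a at the head
theorem foldl_add_cons {α : Type} [BEq α] [LawfulBEq α] (a : α) :
    ∀ (l : List α) (s : PySem.Set α), (∀ x ∈ l, x ≠ a) →
      List.foldl PySem.Set.add (a :: s) l = a :: List.foldl PySem.Set.add s l := by
  intro l
  induction l with
  | nil => intro s _; rfl
  | cons x rest ih =>
    intro s hl
    have hx : x ≠ a := hl x List.mem_cons_self
    have hstep : PySem.Set.add (a :: s) x = a :: PySem.Set.add s x := by
      by_cases h : x ∈ s
      · have h1 : PySem.Set.add s x = s := by simp [PySem.Set.add, h]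
        have h2 : PySem.Set.add (a :: s) x = a :: s := by
          simp [PySem.Set.add, List.mem_cons, h]
        rw [h1, h2]
      · have h1 : PySem.Set.add s x = s ++ [x] := by simp [PySem.Set.add, h]
        have h2 : PySem.Set.add (a :: s) x = (a :: s) ++ [x] := by
          simp [PySem.Set.add, List.mem_cons, h, hx]
        rw [h1, h2]; rfl
    rw [List.foldl_cons, List.foldl_cons, hstep]
    exact ih _ (fun y hy => hl y (List.mem_cons_of_mem _ hy))

-- first-occurrence dedup, one step: set(a :: l) = a :: set(l with a removed)
theorem ofList_cons_filter {α : Type} [BEq α] [LawfulBEq α] (a : α) (l : List α) :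
    PySem.Set.ofList (a :: l) = a :: PySem.Set.ofList (l.filter (fun x => x != a)) := by
  rw [PySem.Set.ofList_eq_foldl, List.foldl_cons]
  have ha : PySem.Set.add ([] : PySem.Set α) a = a :: ([] : PySem.Set α) := by
    simp [PySem.Set.add]
  rw [ha, foldl_add_mem a l _ List.mem_cons_self,
      foldl_add_cons a _ [] (fun x hx => by simpa [bne] using (List.of_mem_filter hx)),
      ← PySem.Set.ofList_eq_foldl]

-- B's recursive grouping, characterised: one entry per first-occurrence key, holding the
-- names of all pairs with that key, in order
theorem groupB_eq_aux : ∀ (n : Nat) (M : List (String × String)), M.length ≤ n →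
    groupB M = (PySem.Set.ofList (M.map (·.1))).map
        (fun k => (k, (M.filter (fun q => q.1 == k)).map (·.2))) := by
  intro n
  induction n with
  | zero =>
    intro M hM
    match M, hM with
    | [], _ => simp [groupB]
  | succ n ih =>
    intro M hM
    match M with
    | [] => simp [groupB]
    | p :: rest =>
      rw [groupB]
      have hdrop : (p :: rest).filter (fun q => q.1 != p.1)
          = rest.filter (fun q => q.1 != p.1) := by
        simp
      have hlen : ((p :: rest).filter (fun q => q.1 != p.1)).length ≤ n := by
        rw [hdrop]
        exact le_trans (List.length_filter_le _ _) (Nat.le_of_succ_le_succ hM)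
      rw [ih _ hlen, hdrop]
      have hmapfil : (rest.filter (fun q => q.1 != p.1)).map (·.1)
          = (rest.map (·.1)).filter (fun x => x != p.1) := by
        rw [List.filter_map]; rfl
      rw [List.map_cons, ofList_cons_filter p.1 (rest.map (·.1)), List.map_cons, ← hmapfil]
      congr 1
      refine List.map_congr_left (fun k hk => ?_)
      have hkne : (k == p.1) = false := by
        rcases List.mem_map.mp ((PySem.Set.mem_ofList _ k).mp hk) with ⟨x, hx, hxe⟩
        have := List.of_mem_filter hx
        subst hxe
        simpa [bne] using this
      have hkne2 : (p.1 == k) = false := by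
        rw [beq_eq_false_iff_ne] at hkne ⊢; exact fun h => hkne h.symm
      congr 1
      simp only [List.filter_cons, hkne2, Bool.false_eq_true, if_false, List.filter_filter]
      refine congrArg _ (List.filter_congr (fun q _ => ?_))
      by_cases h : q.1 = k
      · simp [h, bne, hkne]
      · simp [h]

theorem groupB_eq (M : List (String × String)) :
    groupB M = (PySem.Set.ofList (M.map (·.1))).map
        (fun k => (k, (M.filter (fun q => q.1 == k)).map (·.2))) :=
  groupB_eq_aux M.length M le_rfl

-- ===== VERDICT (by name: the statement is the Claim_ definition above) =====
theorem cluster_runtime_behavior_spec : Claim_equal_cluster_runtime_behavior := by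
  intro data _ hpre
  unfold Spec_cluster_runtime_behavior
  unfold Pre_cluster_runtime_behavior at hpre
  rw [List.all_eq_true] at hpre
  set L := (PySem.Dict.ofList data).items with hLdef
  have hL : ∀ p ∈ L, (clusterKeyA p.2).isSome := by
    intro p hp
    have hd := hpre p (mem_items_ofList data p hp)
    rw [Bool.and_eq_true] at hd
    unfold clusterKeyA
    rw [PySem.Dict.contains_eq_isSome_get?, PySem.Dict.contains_eq_isSome_get?] at hd
    obtain ⟨a, ha⟩ := Option.isSome_iff_exists.mp hd.1
    obtain ⟨b, hb⟩ := Option.isSome_iff_exists.mp hd.2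
    simp [ha, hb]
  set M := L.map (fun p => (((clusterKeyA p.2).getD ""), p.1)) with hMdef
  -- A side
  unfold cluster_runtime_behavior
  rw [goA_eq_foldl L hL, ← hMdef]
  set D := M.foldl (fun d q => d.modify q.1 [] (· ++ [q.2])) PySem.Dict.empty with hDdef
  have hkeys : D.keys = PySem.Set.ofList (M.map (·.1)) := by
    rw [hDdef]
    rw [PySem.Dict.keys_foldl_modify_key M (fun q => q.1) [] (fun _ q v => v ++ [q.2])]
    rw [PySem.Dict.keys_empty, PySem.Set.update_nil_left]
  have hnd : D.keys.Nodup := by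
    rw [hDdef]
    exact PySem.Dict.nodup_keys_foldl_modify_key M (fun q => q.1) [] (fun _ q v => v ++ [q.2])
      PySem.Dict.empty PySem.Dict.nodup_keys_empty
  have hgetD : ∀ c, D.getD c [] = (M.filter (fun q => q.1 == c)).map (·.2) := by
    intro c
    rw [hDdef, PySem.Dict.getD_foldl_modify_append M PySem.Dict.empty c,
      PySem.Dict.getD_empty]
    rfl
  rw [PySem.Dict.items_eq_map_keys D hnd []]
  -- B side
  unfold cluster_runtime_behavior_alt
  rw [pairsB_eq_map L hL]
  rw [← hMdef, groupB_eq, ← hkeys]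
  exact List.map_congr_left (fun k _ => by rw [hgetD k])
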